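-- pv_equiv track=rewrite | github.com/Minnael/ASSOCIATION-SEQUENCE-RULES | GSP/GSP.py | gerar_candidatos
-- ===== SOURCE A (Python) =====
-- def gerar_candidatos(Lk):
--     """
--     Gera candidatos de tamanho k+1 a partir das sequências frequentes Lk
--     """
--     candidatos = []
--
--     for s1 in Lk:
--         for s2 in Lk:
--             if s1[1:] == s2[:-1]:
--                 nova_sequencia = s1 + [s2[-1]]
--
--                 if nova_sequencia not in candidatos:
--                     candidatos.append(nova_sequencia)
--
--     return candidatos
-- ===== SOURCE B (Python) =====
-- def gerar_candidatos(Lk):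
--     # Hash-index sequences by their prefix; one lookup per s1 instead of an
--     # inner scan, and a seen-set instead of a linear membership test.
--     index = {}
--     for s in Lk:
--         if s:
--             index.setdefault(tuple(s[:-1]), []).append(s[-1])
--     seen = set()
--     candidatos = []
--     for s1 in Lk:
--         for last in index.get(tuple(s1[1:]), []):
--             nova = s1 + [last]
--             chave = tuple(nova)
--             if chave not in seen:
--                 seen.add(chave)
--                 candidatos.append(nova)
--     return candidatos
-- ===== Notes on version B (the rewrite author's own statement) =====
-- stated objective: faster
-- what changed: Replaces the quadratic all-pairs scan with a hash index from prefix to last elements (one lookup per s1) and a seen-set replacing the linear 'not in candidatos' test.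
import Mathlib
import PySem

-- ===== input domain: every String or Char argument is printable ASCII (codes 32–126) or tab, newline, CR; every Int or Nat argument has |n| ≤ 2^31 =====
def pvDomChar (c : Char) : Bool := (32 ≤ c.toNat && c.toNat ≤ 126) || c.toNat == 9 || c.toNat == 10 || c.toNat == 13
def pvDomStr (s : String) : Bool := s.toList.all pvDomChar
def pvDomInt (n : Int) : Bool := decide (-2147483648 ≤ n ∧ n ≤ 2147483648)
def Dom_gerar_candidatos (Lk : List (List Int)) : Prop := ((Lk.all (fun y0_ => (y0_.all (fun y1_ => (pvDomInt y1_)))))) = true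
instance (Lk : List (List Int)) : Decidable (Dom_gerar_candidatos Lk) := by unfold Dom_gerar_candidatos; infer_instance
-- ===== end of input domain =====

-- B indexes Lk by prefix and dedups with a seen-set instead of A's all-pairs scan with a linear
-- membership test; faster in a timing run (asymptotic mechanism).

-- ===== PORT A =====
def gerar_candidatos (Lk : List (List Int)) : List (List Int) :=
  Lk.foldl (fun cands s1 =>
    Lk.foldl (fun cands s2 =>
      if PySem.List.slice s1 (some 1) none = PySem.List.slice s2 none (some (-1)) then
        -- s2[-1]; the IndexError case (s2 = []) is excluded by Pre_
        let nova := s1 ++ [PySem.List.pyGetD s2 (-1) 0]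
        if nova ∉ cands then cands ++ [nova] else cands
      else cands) cands) []

-- ===== PORT B =====
def gerar_candidatos_alt (Lk : List (List Int)) : List (List Int) :=
  let index : PySem.Dict (List Int) (List Int) :=
    Lk.foldl (fun d s =>
      if s = [] then d
      else d.modify (PySem.List.slice s none (some (-1))) []
             (· ++ [PySem.List.pyGetD s (-1) 0])) PySem.Dict.empty
  (Lk.foldl (fun (st : PySem.Set (List Int) × List (List Int)) s1 =>
      (index.getD (PySem.List.slice s1 (some 1) none) []).foldl (fun st last =>
        let nova := s1 ++ [last]
        if nova ∈ st.1 then st else (PySem.Set.add st.1 nova, st.2 ++ [nova])) st)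
    (PySem.Set.empty, [])).2

-- ===== PRECONDITION & SPEC =====
-- Pre_ excludes inputs containing an empty sequence: there Python A raises IndexError at s2[-1].
def Pre_gerar_candidatos (Lk : List (List Int)) : Prop := ∀ s ∈ Lk, s ≠ []
instance (Lk : List (List Int)) : Decidable (Pre_gerar_candidatos Lk) := by unfold Pre_gerar_candidatos; infer_instance
def pvWitness_gerar_candidatos : List (List Int) := [[1, 2], [2, 3]]


def Spec_gerar_candidatos (Lk : List (List Int)) (out : List (List Int)) : Prop := out = gerar_candidatos_alt Lk
instance (Lk : List (List Int)) (out : List (List Int)) : Decidable (Spec_gerar_candidatos Lk out) := by unfold Spec_gerar_candidatos; infer_instance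

-- ===== CLAIM (what is proved, stated in full; the proofs are below) =====
def Claim_equal_gerar_candidatos : Prop := ∀ (Lk : List (List Int)), Dom_gerar_candidatos Lk → Pre_gerar_candidatos Lk → Spec_gerar_candidatos Lk (gerar_candidatos Lk)

-- ===== LEMMAS AND PROOFS =====

-- the join of a last element onto s1 (the value both programs append)
def pvLast (s : List Int) : Int := PySem.List.pyGetD s (-1) 0

-- step 1: the index built by B answers exactly "lasts of the sequences whose dropLast is p"
theorem pv_index_getD (Lk : List (List Int)) (h : ∀ s ∈ Lk, s ≠ []) (p : List Int) :
    (Lk.foldl (fun d s =>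
      if s = [] then d
      else d.modify s.dropLast [] (· ++ [pvLast s])) PySem.Dict.empty).getD p []
    = ((Lk.filter (fun s => s.dropLast == p)).map pvLast) := by
  have hrw : Lk.foldl (fun d s =>
      if s = [] then d
      else d.modify s.dropLast [] (· ++ [pvLast s])) PySem.Dict.empty
      = (Lk.map (fun s => (s.dropLast, pvLast s))).foldl
          (fun d q => d.modify q.1 [] (· ++ [q.2])) PySem.Dict.empty := by
    rw [List.foldl_map]
    apply PySem.List.foldl_congr_mem
    intro d s hs
    simp [h s hs]
  rw [hrw, PySem.Dict.getD_foldl_modify_append, PySem.Dict.getD_empty, List.filter_map,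
    List.map_map]
  simp [Function.comp_def]

-- step 2: a filtered-push loop equals a fold over the filtered-and-mapped list
theorem pv_foldl_filter_map {α β γ : Type} (l : List α) (p : α → Bool) (g : α → β)
    (f : γ → β → γ) (c0 : γ) :
    l.foldl (fun c x => if p x then f c (g x) else c) c0
      = ((l.filter p).map g).foldl f c0 := by
  induction l generalizing c0 with
  | nil => rfl
  | cons x xs ih =>
    by_cases hx : p x <;> simp [hx, ih]

-- step 3: the seen-set loop tracks exactly A's "not in candidatos" push
theorem pv_seen_foldl {β : Type} (vs : List β) (mk : β → List Int)
    (seen : PySem.Set (List Int)) (out : List (List Int))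
    (hinv : ∀ x, x ∈ seen ↔ x ∈ out) :
    (vs.foldl (fun (st : PySem.Set (List Int) × List (List Int)) v =>
        if mk v ∈ st.1 then st else (PySem.Set.add st.1 (mk v), st.2 ++ [mk v])) (seen, out)).2
      = vs.foldl (fun c v => if mk v ∉ c then c ++ [mk v] else c) out
    ∧ (∀ x, x ∈ (vs.foldl (fun (st : PySem.Set (List Int) × List (List Int)) v =>
        if mk v ∈ st.1 then st else (PySem.Set.add st.1 (mk v), st.2 ++ [mk v])) (seen, out)).1
        ↔ x ∈ (vs.foldl (fun (st : PySem.Set (List Int) × List (List Int)) v =>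
        if mk v ∈ st.1 then st else (PySem.Set.add st.1 (mk v), st.2 ++ [mk v])) (seen, out)).2) := by
  induction vs generalizing seen out with
  | nil => exact ⟨rfl, hinv⟩
  | cons v vs ih =>
    by_cases hv : mk v ∈ seen
    · have hv' : mk v ∈ out := (hinv _).mp hv
      simpa [hv, hv'] using ih seen out hinv
    · have hv' : mk v ∉ out := fun h => hv ((hinv _).mpr h)
      have hinv' : ∀ x, x ∈ PySem.Set.add seen (mk v) ↔ x ∈ out ++ [mk v] := by
        intro x
        simp [PySem.Set.mem_add, hinv x, or_comm]
      simpa [hv, hv'] using ih _ _ hinv'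

-- ===== VERDICT (by name: the statement is the Claim_ definition above) =====
theorem gerar_candidatos_spec : Claim_equal_gerar_candidatos := by
  intro Lk _ hPre
  unfold Spec_gerar_candidatos gerar_candidatos gerar_candidatos_alt
  simp only [PySem.List.slice_from_one, PySem.List.slice_to_neg_one]
  rw [show (fun (d : PySem.Dict (List Int) (List Int)) s =>
      if s = [] then d
      else d.modify s.dropLast [] (· ++ [PySem.List.pyGetD s (-1) 0]))
    = (fun d s => if s = [] then d else d.modify s.dropLast [] (· ++ [pvLast s])) from rfl]
  -- relate the two outer folds by the seen/out invariant
  suffices h : ∀ (l : List (List Int)) (seen : PySem.Set (List Int)) (out : List (List Int)),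
      (∀ x, x ∈ seen ↔ x ∈ out) →
      (l.foldl (fun c s1 =>
        Lk.foldl (fun c s2 =>
          if s1.tail = s2.dropLast then
            if s1 ++ [PySem.List.pyGetD s2 (-1) 0] ∉ c then c ++ [s1 ++ [PySem.List.pyGetD s2 (-1) 0]] else c
          else c) c) out)
      = (l.foldl (fun (st : PySem.Set (List Int) × List (List Int)) s1 =>
          ((Lk.foldl (fun d s =>
              if s = [] then d
              else d.modify s.dropLast [] (· ++ [pvLast s])) PySem.Dict.empty).getD s1.tail []).foldl
            (fun st last =>
              if s1 ++ [last] ∈ st.1 then st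
              else (PySem.Set.add st.1 (s1 ++ [last]), st.2 ++ [s1 ++ [last]])) st) (seen, out)).2 by
    exact (h Lk PySem.Set.empty [] (by simp [PySem.Set.empty])).symm ▸ rfl
  intro l
  induction l with
  | nil => intro seen out _; rfl
  | cons s1 rest ih =>
    intro seen out hinv
    simp only [List.foldl_cons]
    rw [pv_index_getD Lk hPre s1.tail]
    have hA : Lk.foldl (fun c s2 =>
        if s1.tail = s2.dropLast then
          if s1 ++ [PySem.List.pyGetD s2 (-1) 0] ∉ c then c ++ [s1 ++ [PySem.List.pyGetD s2 (-1) 0]] else c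
        else c) out
      = ((Lk.filter (fun s => s.dropLast == s1.tail)).map pvLast).foldl
          (fun c last => if s1 ++ [last] ∉ c then c ++ [s1 ++ [last]] else c) out := by
      rw [← pv_foldl_filter_map Lk (fun s => s.dropLast == s1.tail) pvLast
        (fun c last => if s1 ++ [last] ∉ c then c ++ [s1 ++ [last]] else c) out]
      apply PySem.List.foldl_congr_mem
      intro c s2 _
      by_cases hc : s1.tail = s2.dropLast
      · simp [hc, pvLast]
      · have : (s2.dropLast == s1.tail) = false := by
          simp [Ne.symm hc]
        simp [hc, this]
    obtain ⟨h2, hinv'⟩ := pv_seen_foldl ((Lk.filter (fun s => s.dropLast == s1.tail)).map pvLast)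
      (fun last => s1 ++ [last]) seen out hinv
    rw [hA, ← h2]
    exact ih _ _ hinv'
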